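-- pv_equiv track=rewrite | github.com/skelsec/socksohttp | socksOhttp/socksohttp/modules/socks5.py | get_mutual_preference
-- ===== SOURCE A (Python) =====
-- def get_mutual_preference(preference, offered):
-- 	# this is a commonly used algo when we need to determine the mutual option
-- 	# which is both supported by the client and the server, in order of the
-- 	# server's preference
-- 	"""
-- 	Generic function to determine which option to use from two lists of options offered by two parties.
-- 	Returns the option that is mutual and in the highes priority of the preference
-- 	:param preference: A list of options where the preference is set by the option's position in the list (lower is most preferred)
-- 	:type preference: list
-- 	:param offered: A list of options that the other party can offer
-- 	:type offered: list
-- 	:return: tuple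
-- 	"""
-- 	clinet_supp = set(offered)
-- 	server_supp = set(preference)
-- 	common_supp = server_supp.intersection(clinet_supp)
-- 	if common_supp is None:
-- 		return None, None
--
-- 	preferred_opt = None
-- 	for srv_option in preference:
-- 		for common_option in common_supp:
-- 			if common_option == srv_option:
-- 				preferred_opt = srv_option
-- 				break
-- 		else:
-- 			continue
-- 		break
--
-- 	# getting index of the preferred option...
-- 	preferred_opt_idx = 0
-- 	for option in offered:
-- 		if option == preferred_opt:
-- 			# preferred_dialect_idx += 1
-- 			break
-- 		preferred_opt_idx += 1
--
-- 	return preferred_opt, preferred_opt_idx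
-- ===== SOURCE B (Python) =====
-- def get_mutual_preference(preference, offered):
--     # One pass over offered with a preference-rank dict (first occurrence wins),
--     # keeping the running best (strictly smaller rank updates best option/index).
--     rank = {}
--     for i, opt in enumerate(preference):
--         rank.setdefault(opt, i)
--     best = None
--     best_idx = len(offered)
--     best_rank = None
--     for j, opt in enumerate(offered):
--         r = rank.get(opt)
--         if r is not None and (best_rank is None or r < best_rank):
--             best, best_idx, best_rank = opt, j, r
--     return best, best_idx
-- ===== Notes on version B (the rewrite author's own statement) =====
-- stated objective: alternative
-- what changed: Replaces A's set-intersection plus nested scan over preference (and a second scan for the index) with a rank dict built from preference and a single best-tracking pass over offered that yields option and index together.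
import Mathlib
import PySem

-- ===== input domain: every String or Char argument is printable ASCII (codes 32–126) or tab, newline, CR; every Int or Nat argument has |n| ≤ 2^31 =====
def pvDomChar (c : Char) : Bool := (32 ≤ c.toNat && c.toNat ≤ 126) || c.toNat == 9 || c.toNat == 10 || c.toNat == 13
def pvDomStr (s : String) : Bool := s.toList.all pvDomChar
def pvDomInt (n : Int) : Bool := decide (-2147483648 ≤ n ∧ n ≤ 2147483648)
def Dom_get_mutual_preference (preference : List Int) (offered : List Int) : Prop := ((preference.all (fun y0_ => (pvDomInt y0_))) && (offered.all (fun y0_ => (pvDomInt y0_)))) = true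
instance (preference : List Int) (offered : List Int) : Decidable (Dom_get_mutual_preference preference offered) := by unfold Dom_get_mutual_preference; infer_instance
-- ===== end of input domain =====

-- B replaces A's nested scan of preference against the intersection set (plus a second
-- index scan) by a rank dict over preference and one best-tracking pass over offered
-- (alternative decomposition, same return value).

-- ===== PORT A =====
-- inner 'for common_option in common_supp: … break' consumed only as a membership
-- test (order-independent, so porting the set's list order is exact)
def pvAmem (common : List Int) (x : Int) : Bool :=
  match common with
  | [] => false
  | c :: rest => if c = x then true else pvAmem rest x

-- outer 'for srv_option in preference' with the break/else/continue: first hit wins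
def pvAfind (preference : List Int) (common : List Int) : Option Int :=
  match preference with
  | [] => none
  | s :: rest => if pvAmem common s then some s else pvAfind rest common

-- the index loop: 'option == preferred_opt' with preferred_opt possibly None
def pvAidx (offered : List Int) (pref : Option Int) (acc : Int) : Int :=
  match offered with
  | [] => acc
  | o :: rest => if some o = pref then acc else pvAidx rest pref (acc + 1)

def get_mutual_preference (preference : List Int) (offered : List Int) : Option Int × Int :=
  let clinet_supp := PySem.Set.ofList offered
  let server_supp := PySem.Set.ofList preference
  let common_supp := PySem.Set.inter server_supp clinet_supp
  -- 'if common_supp is None' is never true in Python (intersection returns a set)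
  let preferred_opt := pvAfind preference common_supp
  let preferred_opt_idx := pvAidx offered preferred_opt 0
  (preferred_opt, preferred_opt_idx)

-- ===== PORT B =====
-- rank = {}; for i, opt in enumerate(preference): rank.setdefault(opt, i)
def pvBrank (preference : List Int) : PySem.Dict Int Int :=
  (PySem.List.enumerate preference 0).foldl
    (fun d p => PySem.Dict.setdefault d p.2 p.1) PySem.Dict.empty

-- for j, opt in enumerate(offered): running (best, best_idx, best_rank)
def pvBloop (rank : PySem.Dict Int Int) (l : List (Int × Int))
    (st : Option Int × Int × Option Int) : Option Int × Int × Option Int :=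
  match l with
  | [] => st
  | (j, opt) :: rest =>
    match PySem.Dict.get? rank opt with
    | none => pvBloop rank rest st
    | some r =>
      match st.2.2 with
      | none => pvBloop rank rest (some opt, j, some r)
      | some br => if r < br then pvBloop rank rest (some opt, j, some r)
                   else pvBloop rank rest st

def get_mutual_preference_alt (preference : List Int) (offered : List Int) : Option Int × Int :=
  let rank := pvBrank preference
  let st := pvBloop rank (PySem.List.enumerate offered 0)
              (none, (offered.length : Int), none)
  (st.1, st.2.1)

-- ===== PRECONDITION & SPEC =====
def Spec_get_mutual_preference (preference : List Int) (offered : List Int) (out : Option Int × Int) : Prop := out = get_mutual_preference_alt preference offered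
instance (preference : List Int) (offered : List Int) (out : Option Int × Int) : Decidable (Spec_get_mutual_preference preference offered out) := by unfold Spec_get_mutual_preference; infer_instance

-- ===== CLAIM (what is proved, stated in full; the proofs are below) =====
def Claim_equal_get_mutual_preference : Prop := ∀ (preference : List Int) (offered : List Int), Dom_get_mutual_preference preference offered → Spec_get_mutual_preference preference offered (get_mutual_preference preference offered)

-- ===== LEMMAS AND PROOFS =====

lemma pvAmem_iff (common : List Int) (x : Int) : pvAmem common x = true ↔ x ∈ common := by
  induction common with
  | nil => simp [pvAmem]
  | cons c rest ih =>
    by_cases h : c = x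
    · subst h; simp [pvAmem]
    · simp only [pvAmem, if_neg h, List.mem_cons, ih]
      exact ⟨Or.inr, fun hx => hx.resolve_left (fun he => h he.symm)⟩

lemma pvAidx_none (offered : List Int) : ∀ acc : Int,
    pvAidx offered none acc = acc + offered.length := by
  induction offered with
  | nil => intro acc; simp [pvAidx]
  | cons o rest ih => intro acc; simp [pvAidx, ih]; ring

lemma pvAfind_none (preference common : List Int)
    (h : pvAfind preference common = none) : ∀ s ∈ preference, s ∉ common := by
  induction preference with
  | nil => simp
  | cons a rest ih =>
    intro s hs
    simp only [pvAfind] at h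
    by_cases ha : pvAmem common a = true
    · simp [ha] at h
    · rcases List.mem_cons.1 hs with rfl | hs'
      · exact fun hc => ha ((pvAmem_iff _ _).2 hc)
      · exact ih (by simpa [ha] using h) s hs'

lemma pvAfind_some (preference common : List Int) (p : Int)
    (h : pvAfind preference common = some p) :
    ∃ pre suf, preference = pre ++ p :: suf ∧ p ∈ common ∧ ∀ s ∈ pre, s ∉ common := by
  induction preference with
  | nil => simp [pvAfind] at h
  | cons a rest ih =>
    simp only [pvAfind] at h
    by_cases ha : pvAmem common a = true
    · simp only [ha, if_true, Option.some.injEq] at h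
      subst h
      exact ⟨[], rest, rfl, (pvAmem_iff _ _).1 ha, by simp⟩
    · rcases ih (by simpa [ha] using h) with ⟨pre, suf, hpf, hpc, hpre⟩
      refine ⟨a :: pre, suf, by simp [hpf], hpc, ?_⟩
      intro s hs
      rcases List.mem_cons.1 hs with rfl | hs'
      · exact fun hc => ha ((pvAmem_iff _ _).2 hc)
      · exact hpre s hs'

-- the rank dict computes first-occurrence indices
lemma pvRank_get_aux (x : Int) : ∀ (pref : List Int) (s : Int) (d : PySem.Dict Int Int),
    PySem.Dict.get?
      ((PySem.List.enumerate pref s).foldl (fun d p => PySem.Dict.setdefault d p.2 p.1) d) x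
      = match PySem.Dict.get? d x with
        | some v => some v
        | none => (PySem.List.index? pref x).map (fun k => s + (k : Int)) := by
  intro pref
  induction pref with
  | nil => intro s d; cases h : PySem.Dict.get? d x <;> simp [PySem.List.enumerate_nil, h, PySem.List.index?_eq_idxOf?, List.idxOf?]
  | cons a rest ih =>
    intro s d
    rw [PySem.List.enumerate_cons]
    simp only [List.foldl_cons]
    rw [ih (s + 1) (PySem.Dict.setdefault d a s)]
    by_cases hax : x = a
    · subst hax
      rw [PySem.Dict.get?_setdefault_self]
      cases h : PySem.Dict.get? d x with
      | some v => simp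
      | none =>
        rw [PySem.List.index?_cons_self]
        simp
    · rw [PySem.Dict.get?_setdefault_of_ne d s hax]
      cases h : PySem.Dict.get? d x with
      | some v => simp
      | none =>
        rw [PySem.List.index?_cons_of_ne rest (fun he => hax he.symm)]
        cases hr : PySem.List.index? rest x with
        | none => simp
        | some k => simp; ring

lemma pvRank_get (preference : List Int) (x : Int) :
    PySem.Dict.get? (pvBrank preference) x
      = (PySem.List.index? preference x).map (fun k => (k : Int)) := by
  unfold pvBrank
  rw [pvRank_get_aux x preference 0 PySem.Dict.empty]
  have : PySem.Dict.get? (PySem.Dict.empty : PySem.Dict Int Int) x = none := rfl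
  rw [this]
  cases h : PySem.List.index? preference x <;> simp

-- first pair index with second component p
def pvFirstJ (p : Int) (l : List (Int × Int)) : Int :=
  match l with
  | [] => 0
  | (j, o) :: rest => if o = p then j else pvFirstJ p rest

lemma pvFirstJ_eq_pvAidx (p : Int) : ∀ (l : List Int) (s : Int), p ∈ l →
    pvFirstJ p (PySem.List.enumerate l s) = pvAidx l (some p) s := by
  intro l
  induction l with
  | nil => intro s h; exact absurd h (List.not_mem_nil)
  | cons o rest ih =>
    intro s h
    rw [PySem.List.enumerate_cons]
    simp only [pvFirstJ, pvAidx, Option.some.injEq]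
    by_cases ho : o = p
    · simp [ho]
    · have hp : p ∈ rest := (List.mem_cons.1 h).resolve_left (fun he => ho he.symm)
      simp [ho, ih (s + 1) hp]

lemma pvBloop_skip (rank : PySem.Dict Int Int) :
    ∀ (l : List (Int × Int)), (∀ pr ∈ l, PySem.Dict.get? rank pr.2 = none) →
    ∀ st, pvBloop rank l st = st := by
  intro l
  induction l with
  | nil => intro _ st; rfl
  | cons pr rest ih =>
    intro h st
    obtain ⟨j, o⟩ := pr
    simp only [pvBloop]
    rw [h (j, o) (List.mem_cons_self)]
    exact ih (fun q hq => h q (List.mem_cons_of_mem _ hq)) st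

-- once the best rank i0 is the minimum possible, the state never changes again
lemma pvBloop_stall (rank : PySem.Dict Int Int) (off0 : List Int) (i0 : Int)
    (hmin : ∀ x ∈ off0, ∀ k, PySem.Dict.get? rank x = some k → i0 ≤ k) :
    ∀ (l : List (Int × Int)), (∀ pr ∈ l, pr.2 ∈ off0) →
    ∀ (b : Option Int) (bi : Int),
      pvBloop rank l (b, bi, some i0) = (b, bi, some i0) := by
  intro l
  induction l with
  | nil => intro _ b bi; rfl
  | cons pr rest ih =>
    intro h b bi
    obtain ⟨j, o⟩ := pr
    have ho : o ∈ off0 := h (j, o) (List.mem_cons_self)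
    have htl : ∀ pr ∈ rest, pr.2 ∈ off0 := fun q hq => h q (List.mem_cons_of_mem _ hq)
    cases hg : PySem.Dict.get? rank o with
    | none => simp only [pvBloop, hg]; exact ih htl b bi
    | some r =>
      have hle : i0 ≤ r := hmin o ho r hg
      simp only [pvBloop, hg]
      rw [if_neg (not_lt.2 hle)]
      exact ih htl b bi

lemma pvBloop_find (rank : PySem.Dict Int Int) (off0 : List Int) (p i0 : Int)
    (hp : PySem.Dict.get? rank p = some i0)
    (hmin : ∀ x ∈ off0, ∀ k, PySem.Dict.get? rank x = some k → i0 ≤ k ∧ (k = i0 → x = p)) :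
    ∀ (l : List (Int × Int)), (∀ pr ∈ l, pr.2 ∈ off0) → (∃ pr ∈ l, pr.2 = p) →
    ∀ (b : Option Int) (bi : Int) (br : Option Int),
      (br = none ∨ ∃ rb, br = some rb ∧ i0 < rb) →
      pvBloop rank l (b, bi, br) = (some p, pvFirstJ p l, some i0) := by
  intro l
  induction l with
  | nil => rintro _ ⟨pr, hpr, _⟩ _ _ _ _; exact absurd hpr (List.not_mem_nil)
  | cons pr rest ih =>
    intro hsub hex b bi br hbr
    obtain ⟨j, o⟩ := pr
    have ho : o ∈ off0 := hsub (j, o) (List.mem_cons_self)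
    have htl : ∀ q ∈ rest, q.2 ∈ off0 := fun q hq => hsub q (List.mem_cons_of_mem _ hq)
    have hmin' : ∀ x ∈ off0, ∀ k, PySem.Dict.get? rank x = some k → i0 ≤ k :=
      fun x hx k hk => (hmin x hx k hk).1
    by_cases hop : o = p
    · subst hop
      simp only [pvBloop, hp, pvFirstJ, if_pos]
      rcases hbr with rfl | ⟨rb, rfl, hlt⟩
      · exact pvBloop_stall rank off0 i0 hmin' rest htl (some o) j
      · simp only [if_pos hlt]
        exact pvBloop_stall rank off0 i0 hmin' rest htl (some o) j
    · have hex' : ∃ q ∈ rest, q.2 = p := by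
        rcases hex with ⟨q, hq, hq2⟩
        rcases List.mem_cons.1 hq with rfl | hq'
        · exact absurd hq2 hop
        · exact ⟨q, hq', hq2⟩
      simp only [pvBloop, pvFirstJ, if_neg hop]
      cases hg : PySem.Dict.get? rank o with
      | none => exact ih htl hex' b bi br hbr
      | some r =>
        have hr := hmin o ho r hg
        have hlt : i0 < r := lt_of_le_of_ne hr.1 (fun he => hop (hr.2 he.symm))
        rcases hbr with rfl | ⟨rb, rfl, hltb⟩
        · exact ih htl hex' (some o) j (some r) (Or.inr ⟨r, rfl, hlt⟩)
        · by_cases hcmp : r < rb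
          · simp only [if_pos hcmp]
            exact ih htl hex' (some o) j (some r) (Or.inr ⟨r, rfl, hlt⟩)
          · simp only [if_neg hcmp]
            exact ih htl hex' b bi (some rb) (Or.inr ⟨rb, rfl, hltb⟩)

lemma pvEnum_snd_mem {l : List Int} {s : Int} {pr : Int × Int}
    (h : pr ∈ PySem.List.enumerate l s) : pr.2 ∈ l := by
  have := List.mem_map_of_mem (f := fun q : Int × Int => q.2) h
  rwa [PySem.List.map_snd_enumerate] at this

lemma pvEnum_snd_exists {l : List Int} {s p : Int} (h : p ∈ l) :
    ∃ pr ∈ PySem.List.enumerate l s, pr.2 = p := by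
  have : p ∈ (PySem.List.enumerate l s).map (fun q : Int × Int => q.2) := by
    rwa [PySem.List.map_snd_enumerate]
  rcases List.mem_map.1 this with ⟨pr, hpr, hq⟩
  exact ⟨pr, hpr, hq⟩

-- ===== VERDICT (by name: the statement is the Claim_ definition above) =====
theorem get_mutual_preference_spec : Claim_equal_get_mutual_preference := by
  intro preference offered _
  unfold Spec_get_mutual_preference
  show get_mutual_preference preference offered = get_mutual_preference_alt preference offered
  unfold get_mutual_preference get_mutual_preference_alt
  simp only []
  set common := PySem.Set.inter (PySem.Set.ofList preference) (PySem.Set.ofList offered) with hcommon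
  have hmemc : ∀ x, x ∈ common ↔ x ∈ preference ∧ x ∈ offered := by
    intro x
    rw [hcommon, PySem.Set.mem_inter, PySem.Set.mem_ofList, PySem.Set.mem_ofList]
  cases hfind : pvAfind preference common with
  | none =>
    -- no mutual option: A returns (none, len offered); B's loop never updates
    have hnone : ∀ pr ∈ PySem.List.enumerate offered 0,
        PySem.Dict.get? (pvBrank preference) pr.2 = none := by
      intro pr hpr
      rw [pvRank_get]
      cases hi : PySem.List.index? preference pr.2 with
      | none => rfl
      | some k =>
        have hmem : pr.2 ∈ preference := (PySem.List.index?_isSome_iff preference pr.2).1 (by rw [hi]; rfl)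
        exact absurd ((hmemc pr.2).2 ⟨hmem, pvEnum_snd_mem hpr⟩)
          (pvAfind_none preference common hfind pr.2 hmem)
    rw [pvBloop_skip (pvBrank preference) _ hnone]
    rw [pvAidx_none offered 0]
    simp
  | some p =>
    rcases pvAfind_some preference common p hfind with ⟨pre, suf, hdecomp, hpc, hpre⟩
    subst hdecomp
    have hpoff : p ∈ offered := ((hmemc p).1 hpc).2
    -- rank of p is pre.length
    have hidxp : PySem.List.index? (pre ++ p :: suf) p = some pre.length := by
      rw [PySem.List.index?_eq_some_iff]
      refine ⟨pre, suf, rfl, rfl, fun hmem => hpre p hmem hpc⟩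
    have hrankp : PySem.Dict.get? (pvBrank (pre ++ p :: suf)) p = some (pre.length : Int) := by
      rw [pvRank_get, hidxp]; rfl
    -- minimality of p's rank over offered
    have hmin : ∀ x ∈ offered, ∀ k, PySem.Dict.get? (pvBrank (pre ++ p :: suf)) x = some k →
        ((pre.length : Int) ≤ k ∧ (k = (pre.length : Int) → x = p)) := by
      intro x hx k hk
      rw [pvRank_get] at hk
      cases hi : PySem.List.index? (pre ++ p :: suf) x with
      | none => rw [hi] at hk; exact absurd hk (by simp)
      | some kn =>
        rw [hi] at hk
        have hk' : ((kn : Int)) = k := Option.some.inj hk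
        subst hk'
        rcases PySem.List.getElem_of_index?_eq_some hi with ⟨hklt, hget, _⟩
        have hget? : (pre ++ p :: suf)[kn]? = some x := by
          rw [List.getElem?_eq_getElem hklt, hget]
        have hge : pre.length ≤ kn := by
          by_contra hltk
          rw [not_le] at hltk
          have hx_pre : x ∈ pre :=
            List.mem_of_getElem? (by rwa [List.getElem?_append_left hltk] at hget?)
          exact hpre x hx_pre ((hmemc x).2 ⟨List.mem_of_getElem? hget?, hx⟩)
        refine ⟨by exact_mod_cast hge, fun hkeq => ?_⟩
        have hkn : kn = pre.length := by exact_mod_cast hkeq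
        subst hkn
        have hp2 : (pre ++ p :: suf)[pre.length]? = some p := by
          rw [List.getElem?_append_right (le_refl _)]
          simp
        exact Option.some.inj (hget?.symm.trans hp2)
    rw [pvBloop_find (pvBrank (pre ++ p :: suf)) offered p (pre.length : Int) hrankp hmin
        (PySem.List.enumerate offered 0)
        (fun pr hpr => pvEnum_snd_mem hpr)
        (pvEnum_snd_exists hpoff)
        none ((offered.length : Int)) none (Or.inl rfl)]
    rw [pvFirstJ_eq_pvAidx p offered 0 hpoff]
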